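-- pv_equiv track=rewrite | github.com/Hyunminmax/OZ_Study | Programmers/StudyGroup/240326/240326_코드 처리하기.py | solution
-- ===== SOURCE A (Python) =====
-- def solution(code):
--     answer = ''
--     mode = 0
--     codeLen = len(code)
--
--     for i in range(codeLen):
--         # mode가 0이면
--         if mode == 0:
--             # 코드 인덱스가 1이 아니고
--             if code[i] != '1':
--                 # 인덱스의 값이 짝수면
--                 if i % 2 == 0:
--                     # 인덱스의 값 추가
--                     answer = answer + code[i]
--             # 코드 인덱스가 1이면
--             elif code[i] == '1':
--                 # 모드를 1로 변경
--                 mode = 1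
--         # mode가 1이면
--         elif mode == 1:
--             # 코드 인덱스가 1이 아니고
--             if code[i]!= '1':
--                 # 인덱스의 값이 홀수면
--                 if i % 2 != 0:
--                     # 인덱스의 값 추가
--                     answer = answer + code[i]
--             # 코드 인덱스가 1이면
--             elif code[i] == '1':
--                 # 모드를 0로 변경
--                 mode = 0
--
--     if answer == '':
--         answer = 'EMPTY'
--
--     return answer
-- ===== SOURCE B (Python) =====
-- def solution(code):
--     # pass 1: prefix table -- before[i] = number of '1' characters strictly before index i
--     before = []
--     ones = 0
--     for c in code:
--         before.append(ones)
--         if c == '1':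
--             ones += 1
--     # pass 2: keep a non-'1' char iff its index parity matches the parity of '1's before it
--     answer = ''.join(c for i, c in enumerate(code)
--                      if c != '1' and before[i] % 2 == i % 2)
--     return answer if answer else 'EMPTY'
-- ===== Notes on version B (the rewrite author's own statement) =====
-- stated objective: simpler
-- what changed: Replaces A's stateful mode-toggling branch cascade by two plain passes: first build a prefix table counting the toggle character before each index, then keep a character iff it is not the toggle character and its index parity equals the parity of that prefix count.
import Mathlib
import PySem

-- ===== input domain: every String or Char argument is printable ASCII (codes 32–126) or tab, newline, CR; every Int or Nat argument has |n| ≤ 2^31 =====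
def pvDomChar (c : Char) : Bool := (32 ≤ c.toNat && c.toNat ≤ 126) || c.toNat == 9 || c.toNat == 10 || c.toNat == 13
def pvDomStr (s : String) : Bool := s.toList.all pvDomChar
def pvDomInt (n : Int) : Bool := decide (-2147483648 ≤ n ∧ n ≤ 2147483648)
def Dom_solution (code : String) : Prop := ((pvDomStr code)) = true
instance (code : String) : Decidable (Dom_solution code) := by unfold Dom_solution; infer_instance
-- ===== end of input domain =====

-- B replaces A's mode-toggling state machine by a prefix '1'-count table plus one filtering pass (objective: simpler).

-- ===== PORT A =====
-- A's for-loop, step for step: state = (answer, mode); i is the loop index, one char per step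
def solutionLoop : List Char → Int → List Char → Int → List Char
  | [], _, ans, _ => ans
  | c :: rest, i, ans, mode =>
    if mode = 0 then
      if c ≠ '1' then
        if PySem.Int.mod i 2 = 0 then solutionLoop rest (i + 1) (ans ++ [c]) mode
        else solutionLoop rest (i + 1) ans mode
      else solutionLoop rest (i + 1) ans 1
    else if mode = 1 then
      if c ≠ '1' then
        if PySem.Int.mod i 2 ≠ 0 then solutionLoop rest (i + 1) (ans ++ [c]) mode
        else solutionLoop rest (i + 1) ans mode
      else solutionLoop rest (i + 1) ans 0
    else solutionLoop rest (i + 1) ans mode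

def solution (code : String) : String :=
  let answer := solutionLoop code.toList 0 [] 0
  if answer = [] then "EMPTY" else String.ofList answer

-- ===== PORT B =====
-- pass 1 of Source B: the table before[i] = number of '1' chars strictly before index i
def beforeTable : List Char → Int → List Int
  | [], _ => []
  | c :: rest, ones => ones :: beforeTable rest (if c = '1' then ones + 1 else ones)

def solution_alt (code : String) : String :=
  let cs := code.toList
  let before := beforeTable cs 0
  let answer := ((PySem.List.enumerate cs 0).filter
      (fun p => (p.2 != '1') &&
        (PySem.Int.mod (PySem.List.pyGetD before p.1 0) 2 == PySem.Int.mod p.1 2))).map (·.2)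
  if answer = [] then "EMPTY" else String.ofList answer

-- ===== PRECONDITION & SPEC =====
def Spec_solution (code : String) (out : String) : Prop := out = solution_alt code
instance (code : String) (out : String) : Decidable (Spec_solution code out) := by unfold Spec_solution; infer_instance

-- ===== CLAIM (what is proved, stated in full; the proofs are below) =====
def Claim_equal_solution : Prop := ∀ (code : String), Dom_solution code → Spec_solution code (solution code)

-- ===== LEMMAS AND PROOFS =====

-- common description of the kept chars: from index i with `ones` '1's seen so far, keep a non-'1'
-- char iff its index parity equals the parity of the '1'-count before it
def filt : List Char → Int → Int → List Char
  | [], _, _ => []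
  | c :: rest, i, ones =>
    if c = '1' then filt rest (i + 1) (ones + 1)
    else if PySem.Int.mod ones 2 = PySem.Int.mod i 2 then c :: filt rest (i + 1) ones
    else filt rest (i + 1) ones

-- A's loop computes `filt`: the invariant is mode = (count of '1's seen) % 2
lemma loop_unfold0 (c : Char) (rest : List Char) (i : Int) (ans : List Char) :
    solutionLoop (c :: rest) i ans 0 =
      if c ≠ '1' then
        if PySem.Int.mod i 2 = 0 then solutionLoop rest (i + 1) (ans ++ [c]) 0
        else solutionLoop rest (i + 1) ans 0
      else solutionLoop rest (i + 1) ans 1 := rfl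

lemma loop_unfold1 (c : Char) (rest : List Char) (i : Int) (ans : List Char) :
    solutionLoop (c :: rest) i ans 1 =
      if c ≠ '1' then
        if PySem.Int.mod i 2 ≠ 0 then solutionLoop rest (i + 1) (ans ++ [c]) 1
        else solutionLoop rest (i + 1) ans 1
      else solutionLoop rest (i + 1) ans 0 := rfl

lemma loop_filt (cs : List Char) : ∀ (i ones : Int) (ans : List Char), 0 ≤ ones →
    solutionLoop cs i ans (PySem.Int.mod ones 2) = ans ++ filt cs i ones := by
  induction cs with
  | nil => intro i ones ans _; simp [solutionLoop, filt]
  | cons c rest ih =>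
    intro i ones ans hones
    have h2 : PySem.Int.mod ones 2 = ones % 2 := PySem.Int.mod_eq_emod_of_pos (by omega)
    have hi2 : PySem.Int.mod i 2 = i % 2 := PySem.Int.mod_eq_emod_of_pos (by omega)
    by_cases hc : c = '1'
    · subst hc
      by_cases hm : ones % 2 = 0
      · have hnew : PySem.Int.mod (ones + 1) 2 = 1 := by
          rw [PySem.Int.mod_eq_emod_of_pos (by omega)]; omega
        rw [h2, hm, loop_unfold0, if_neg (by simp)]
        have hrec := ih (i + 1) (ones + 1) ans (by omega)
        rw [hnew] at hrec
        rw [hrec]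
        rw [show filt ('1' :: rest) i ones = filt rest (i + 1) (ones + 1) from by
          simp only [filt]; rw [if_pos trivial]]
      · have hm1 : ones % 2 = 1 := by omega
        have hnew : PySem.Int.mod (ones + 1) 2 = 0 := by
          rw [PySem.Int.mod_eq_emod_of_pos (by omega)]; omega
        rw [h2, hm1, loop_unfold1, if_neg (by simp)]
        have hrec := ih (i + 1) (ones + 1) ans (by omega)
        rw [hnew] at hrec
        rw [hrec]
        rw [show filt ('1' :: rest) i ones = filt rest (i + 1) (ones + 1) from by
          simp only [filt]; rw [if_pos trivial]]
    · have hfilt_keep : PySem.Int.mod ones 2 = PySem.Int.mod i 2 →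
          filt (c :: rest) i ones = c :: filt rest (i + 1) ones := by
        intro h; simp only [filt]; rw [if_neg hc, if_pos h]
      have hfilt_skip : ¬ PySem.Int.mod ones 2 = PySem.Int.mod i 2 →
          filt (c :: rest) i ones = filt rest (i + 1) ones := by
        intro h; simp only [filt]; rw [if_neg hc, if_neg h]
      by_cases hm : ones % 2 = 0
      · rw [h2, hm, loop_unfold0, if_pos hc, hi2]
        by_cases hip : i % 2 = 0
        · rw [if_pos hip]
          have hrec := ih (i + 1) ones (ans ++ [c]) hones
          rw [h2, hm] at hrec
          rw [hrec, hfilt_keep (by rw [h2, hi2, hm, hip]), List.append_assoc]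
          rfl
        · rw [if_neg hip]
          have hrec := ih (i + 1) ones ans hones
          rw [h2, hm] at hrec
          rw [hrec, hfilt_skip (by rw [h2, hi2, hm]; omega)]
      · have hm1 : ones % 2 = 1 := by omega
        rw [h2, hm1, loop_unfold1, if_pos hc, hi2]
        by_cases hip : i % 2 = 0
        · rw [if_neg (by omega : ¬ ¬ i % 2 = 0)]
          have hrec := ih (i + 1) ones ans hones
          rw [h2, hm1] at hrec
          rw [hrec, hfilt_skip (by rw [h2, hi2, hm1, hip]; omega)]
        · have hip1 : i % 2 = 1 := by omega
          rw [if_pos (by omega : ¬ i % 2 = 0)]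
          have hrec := ih (i + 1) ones (ans ++ [c]) hones
          rw [h2, hm1] at hrec
          rw [hrec, hfilt_keep (by rw [h2, hi2, hm1, hip1]), List.append_assoc]
          rfl

lemma fst_mem_enumerate_ge {α : Type} (xs : List α) : ∀ (s : Int) (p : Int × α),
    p ∈ PySem.List.enumerate xs s → s ≤ p.1 := by
  induction xs with
  | nil =>
    intro s p h
    rw [PySem.List.enumerate_nil] at h
    simp at h
  | cons x rest ih =>
    intro s p h
    rw [PySem.List.enumerate_cons] at h
    rcases List.mem_cons.mp h with h | h
    · subst h; simp
    · have := ih (s + 1) p h; omega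

lemma pyGetD_cons_pos {α : Type} (x : α) (xs : List α) (k : Int) (d : α) (hk : 0 < k) :
    PySem.List.pyGetD (x :: xs) k d = PySem.List.pyGetD xs (k - 1) d := by
  rw [PySem.List.pyGetD_of_nonneg _ _ (by omega), PySem.List.pyGetD_of_nonneg _ _ (by omega)]
  have h : k.toNat = (k - 1).toNat + 1 := by omega
  rw [h, List.getD_cons_succ]

-- `filt` is exactly B's enumerate-filter pass against the prefix table
lemma filt_eq_filter (cs : List Char) : ∀ (s ones : Int), 0 ≤ s →
    filt cs s ones =
    ((PySem.List.enumerate cs s).filter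
      (fun p => (p.2 != '1') &&
        (PySem.Int.mod (PySem.List.pyGetD (beforeTable cs ones) (p.1 - s) 0) 2
          == PySem.Int.mod p.1 2))).map (·.2) := by
  induction cs with
  | nil => intro s ones _; rfl
  | cons c rest ih =>
    intro s ones hs
    rw [PySem.List.enumerate_cons]
    have hhead : PySem.List.pyGetD (beforeTable (c :: rest) ones) (s - s) 0 = ones := by
      rw [show s - s = (0 : Int) by omega]
      simp [pysem, beforeTable]
    have htail : ∀ p : Int × Char, p ∈ PySem.List.enumerate rest (s + 1) →
        ((p.2 != '1') &&
          (PySem.Int.mod (PySem.List.pyGetD (beforeTable (c :: rest) ones) (p.1 - s) 0) 2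
            == PySem.Int.mod p.1 2)) =
        ((p.2 != '1') &&
          (PySem.Int.mod
            (PySem.List.pyGetD (beforeTable rest (if c = '1' then ones + 1 else ones)) (p.1 - (s + 1)) 0) 2
            == PySem.Int.mod p.1 2)) := by
      intro p hp
      have h1 : s + 1 ≤ p.1 := fst_mem_enumerate_ge rest (s + 1) p hp
      rw [show beforeTable (c :: rest) ones
            = ones :: beforeTable rest (if c = '1' then ones + 1 else ones) from rfl]
      rw [pyGetD_cons_pos _ _ _ _ (by omega)]
      rw [show p.1 - s - 1 = p.1 - (s + 1) by omega]
    rw [List.filter_cons, List.filter_congr htail]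
    by_cases hc : c = '1'
    · subst hc
      have hfalse : (('1' != '1') &&
          (PySem.Int.mod (PySem.List.pyGetD (beforeTable ('1' :: rest) ones) (s - s) 0) 2
            == PySem.Int.mod s 2)) = false := by simp
      rw [hfalse, if_neg (by simp)]
      have hrec := ih (s + 1) (ones + 1) (by omega)
      rw [show filt ('1' :: rest) s ones = filt rest (s + 1) (ones + 1) from by
        simp only [filt]; rw [if_pos trivial]]
      exact hrec
    · have hcb : (c != '1') = true := bne_iff_ne.mpr hc
      simp only [if_neg hc]
      have hrec := ih (s + 1) ones (by omega)
      by_cases hpar : PySem.Int.mod ones 2 = PySem.Int.mod s 2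
      · have hbeq : (PySem.Int.mod (PySem.List.pyGetD (beforeTable (c :: rest) ones) (s - s) 0) 2
            == PySem.Int.mod s 2) = true := by rw [hhead]; exact beq_iff_eq.mpr hpar
        rw [hcb, hbeq, if_pos (show (true && true) = true from rfl), List.map_cons]
        rw [show filt (c :: rest) s ones = c :: filt rest (s + 1) ones from by
          simp only [filt]; rw [if_neg hc, if_pos hpar]]
        rw [hrec]
      · have hbeq : (PySem.Int.mod (PySem.List.pyGetD (beforeTable (c :: rest) ones) (s - s) 0) 2
            == PySem.Int.mod s 2) = false := by
          rw [hhead]; exact beq_eq_false_iff_ne.mpr hpar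
        rw [hcb, hbeq, Bool.true_and, if_neg (by simp)]
        rw [show filt (c :: rest) s ones = filt rest (s + 1) ones from by
          simp only [filt]; rw [if_neg hc, if_neg hpar]]
        rw [hrec]

-- ===== VERDICT (by name: the statement is the Claim_ definition above) =====
theorem solution_spec : Claim_equal_solution := by
  intro code _
  unfold Spec_solution solution solution_alt
  have hA : solutionLoop code.toList 0 [] 0 = filt code.toList 0 0 := by
    have h := loop_filt code.toList 0 0 [] le_rfl
    rw [show PySem.Int.mod 0 2 = (0 : Int) from by decide] at h
    simpa using h
  have hB := filt_eq_filter code.toList 0 0 le_rfl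
  simp only [sub_zero] at hB
  simp only [hA, hB]
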